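-- pv_equiv track=rewrite | github.com/hlipka/aoc2021 | src/Day18.py | find_explode
-- ===== SOURCE A (Python) =====
-- OPEN = '['
--
-- CLOSE = ']'
--
-- def find_explode(number):
--     open_count = 0
--     pos = 0
--     for el in number:
--         if el == OPEN:
--             open_count += 1
--         if el == CLOSE:
--             open_count -= 1
--         if open_count == 5:
--             return pos
--         pos += 1
--     return -1
-- ===== SOURCE B (Python) =====
-- def find_explode(number):
--     depth = 0
--     pos = 0
--     while True:
--         o = number.find('[', pos)
--         c = number.find(']', pos)
--         if o < 0 and c < 0:
--             return -1
--         if o >= 0 and (c < 0 or o < c):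
--             depth += 1
--             if depth == 5:
--                 return o
--             pos = o + 1
--         else:
--             depth -= 1
--             pos = c + 1
-- ===== Notes on version B (the rewrite author's own statement) =====
-- stated objective: faster
-- what changed: B replaces A's per-character counter loop with an event-jump loop: it repeatedly jumps to the next bracket via str.find(sub, pos), visiting only bracket occurrences, and returns the opening-bracket position at which the depth reaches 5.
import Mathlib
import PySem

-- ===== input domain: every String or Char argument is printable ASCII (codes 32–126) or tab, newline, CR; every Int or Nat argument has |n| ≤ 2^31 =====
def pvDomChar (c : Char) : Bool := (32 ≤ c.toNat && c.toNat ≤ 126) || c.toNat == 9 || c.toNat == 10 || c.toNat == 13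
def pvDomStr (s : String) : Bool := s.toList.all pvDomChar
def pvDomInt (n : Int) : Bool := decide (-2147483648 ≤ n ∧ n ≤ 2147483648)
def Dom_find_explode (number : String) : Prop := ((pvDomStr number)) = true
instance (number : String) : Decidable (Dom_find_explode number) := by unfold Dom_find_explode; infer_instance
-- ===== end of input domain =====

-- B replaces A's per-character counter loop with an event-jump loop over str.find(sub, pos), visiting only bracket occurrences; objective: faster by a constant factor (measured).


-- ===== PORT A =====
-- A's loop: inline counter over each character, post-increment check, early return of the position.
def findExplodeGoA : List Char → Int → Int → Int
  | [], _, _ => -1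
  | c :: rest, oc, pos =>
    let oc1 := if c = '[' then oc + 1 else oc
    let oc2 := if c = ']' then oc1 - 1 else oc1
    if oc2 = 5 then pos else findExplodeGoA rest oc2 (pos + 1)

def find_explode (number : String) : Int := findExplodeGoA number.toList 0 0

-- ===== PORT B =====
-- termination helper for the jump loop: a found index lies in [pos, cs.length)
theorem pvFindFromHigh (cs sub : List Char) (pos : Nat) (h : cs.length < pos) :
    PySem.Chars.findFrom cs sub (pos : Int) = -1 := by
  simp only [PySem.Chars.findFrom]
  split_ifs with h1 h2 h3 <;> first | rfl | omega

theorem pvFindFromBounds (cs : List Char) (ch : Char) (pos : Nat)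
    (h : ¬ PySem.Chars.findFrom cs [ch] (pos : Int) < 0) :
    pos ≤ (PySem.Chars.findFrom cs [ch] (pos : Int)).toNat ∧
      (PySem.Chars.findFrom cs [ch] (pos : Int)).toNat < cs.length := by
  by_cases hlen : pos ≤ cs.length
  · have hne : PySem.Chars.findFrom cs [ch] (pos : Int) ≠ -1 := by
      intro he; rw [he] at h; exact h (by norm_num)
    obtain ⟨h1, h2, _⟩ := PySem.Chars.findFrom_natCast_spec cs [ch] pos hlen hne
    obtain ⟨t, ht⟩ := h2
    have hdrop : List.drop (PySem.Chars.findFrom cs [ch] (pos : Int)).toNat cs = ch :: t := by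
      simpa using ht.symm
    have hlt : (PySem.Chars.findFrom cs [ch] (pos : Int)).toNat < cs.length := by
      by_contra hge
      have : List.drop (PySem.Chars.findFrom cs [ch] (pos : Int)).toNat cs = [] :=
        List.drop_eq_nil_of_le (by omega)
      rw [hdrop] at this; exact List.cons_ne_nil _ _ this
    exact ⟨by omega, hlt⟩
  · rw [pvFindFromHigh cs [ch] pos (by omega)] at h
    exact absurd (by norm_num) h

-- B's loop: repeatedly jump to the next '[' or ']' with find(sub, pos); only brackets are visited.
def findExplodeGoB (cs : List Char) (pos : Nat) (depth : Int) : Int :=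
  if PySem.Chars.findFrom cs ['['] (pos : Int) < 0 ∧ PySem.Chars.findFrom cs [']'] (pos : Int) < 0 then
    -1
  else if 0 ≤ PySem.Chars.findFrom cs ['['] (pos : Int) ∧
      (PySem.Chars.findFrom cs [']'] (pos : Int) < 0 ∨
        PySem.Chars.findFrom cs ['['] (pos : Int) < PySem.Chars.findFrom cs [']'] (pos : Int)) then
    if depth + 1 = 5 then PySem.Chars.findFrom cs ['['] (pos : Int)
    else findExplodeGoB cs ((PySem.Chars.findFrom cs ['['] (pos : Int)).toNat + 1) (depth + 1)
  else
    findExplodeGoB cs ((PySem.Chars.findFrom cs [']'] (pos : Int)).toNat + 1) (depth - 1)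
termination_by cs.length - pos
decreasing_by
  · have hb := pvFindFromBounds cs '[' pos (by omega)
    omega
  · rename_i h1 h2
    have hc : ¬ PySem.Chars.findFrom cs [']'] (pos : Int) < 0 := by
      intro hcn
      exact h2 ⟨by omega, Or.inl hcn⟩
    have hb := pvFindFromBounds cs ']' pos hc
    omega

def find_explode_alt (number : String) : Int := findExplodeGoB number.toList 0 0

-- ===== PRECONDITION & SPEC =====
def Spec_find_explode (number : String) (out : Int) : Prop := out = find_explode_alt number
instance (number : String) (out : Int) : Decidable (Spec_find_explode number out) := by unfold Spec_find_explode; infer_instance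

-- ===== CLAIM (what is proved, stated in full; the proofs are below) =====
def Claim_equal_find_explode : Prop := ∀ (number : String), Dom_find_explode number → Spec_find_explode number (find_explode number)

-- ===== LEMMAS AND PROOFS =====

theorem singleton_infix_iff (a : Char) (l : List Char) : [a] <:+: l ↔ a ∈ l := by
  constructor
  · rintro ⟨s, t, rfl⟩; simp
  · intro h
    obtain ⟨s, t, rfl⟩ := List.append_of_mem h
    exact ⟨s, t, by simp⟩

-- A's loop just advances over a bracket-free segment (counter unchanged, no return since oc ≠ 5)
theorem goA_skip (us : List Char) : ∀ (vs : List Char) (oc pos : Int), oc ≠ 5 →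
    (∀ x ∈ us, x ≠ '[' ∧ x ≠ ']') →
    findExplodeGoA (us ++ vs) oc pos = findExplodeGoA vs oc (pos + us.length) := by
  induction us with
  | nil => intro vs oc pos _ _; simp
  | cons u us ih =>
    intro vs oc pos h5 hnb
    have hu := hnb u (by simp)
    simp only [List.cons_append, findExplodeGoA, if_neg hu.1, if_neg hu.2, if_neg h5]
    rw [ih vs oc (pos + 1) h5 (fun x hx => hnb x (by simp [hx]))]
    congr 1
    simp only [List.length_cons]
    push_cast
    ring

theorem pvFindGoCases (sub : List Char) : ∀ (l : List Char) (k : Nat),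
    PySem.Chars.find.go sub l k = -1 ∨ (k : Int) ≤ PySem.Chars.find.go sub l k := by
  intro l
  induction l with
  | nil =>
    intro k
    by_cases h : sub.isEmpty <;> simp [PySem.Chars.find.go, h]
  | cons a t ih =>
    intro k
    by_cases h : sub.isPrefixOf (a :: t)
    · simp [PySem.Chars.find.go, h]
    · have hstep : PySem.Chars.find.go sub (a :: t) k = PySem.Chars.find.go sub t (k + 1) := by
        simp [PySem.Chars.find.go, h]
      rw [hstep]
      rcases ih (k + 1) with h' | h'
      · exact Or.inl h'
      · refine Or.inr (le_trans ?_ h')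
        push_cast; omega

theorem pvFindFromNeg (cs sub : List Char) (pos : Nat)
    (h : PySem.Chars.findFrom cs sub (pos : Int) < 0) :
    PySem.Chars.findFrom cs sub (pos : Int) = -1 := by
  by_cases hlen : pos ≤ cs.length
  · rw [PySem.Chars.findFrom_natCast cs sub pos hlen] at h ⊢
    split_ifs at h ⊢ with hf
    · rfl
    · exfalso
      have hcase := pvFindGoCases sub (List.drop pos cs) 0
      have hfind : PySem.Chars.find (List.drop pos cs) sub =
          PySem.Chars.find.go sub (List.drop pos cs) 0 := rfl
      rw [hfind] at hf h
      rcases hcase with h' | h' <;> omega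
  · exact pvFindFromHigh _ _ _ (by omega)

-- packaged facts about a successful single-char find: bounds, the char at the index, minimality
theorem pvFindFromFound (cs : List Char) (ch : Char) (pos : Nat) (hpos : pos ≤ cs.length)
    (h : ¬ PySem.Chars.findFrom cs [ch] (pos : Int) < 0) :
    pos ≤ (PySem.Chars.findFrom cs [ch] (pos : Int)).toNat ∧
      (PySem.Chars.findFrom cs [ch] (pos : Int)).toNat < cs.length ∧
      PySem.Chars.findFrom cs [ch] (pos : Int) =
        ((PySem.Chars.findFrom cs [ch] (pos : Int)).toNat : Int) ∧
      cs.drop (PySem.Chars.findFrom cs [ch] (pos : Int)).toNat =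
        ch :: cs.drop ((PySem.Chars.findFrom cs [ch] (pos : Int)).toNat + 1) ∧
      (∀ i : Nat, pos ≤ i → i < (PySem.Chars.findFrom cs [ch] (pos : Int)).toNat →
        ¬ ([ch] <+: cs.drop i)) := by
  have hne : PySem.Chars.findFrom cs [ch] (pos : Int) ≠ -1 := by
    intro he; rw [he] at h; exact h (by norm_num)
  obtain ⟨h1, h2, h3⟩ := PySem.Chars.findFrom_natCast_spec cs [ch] pos hpos hne
  obtain ⟨hb1, hb2⟩ := pvFindFromBounds cs ch pos h
  refine ⟨hb1, hb2, by omega, ?_, h3⟩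
  obtain ⟨t, ht⟩ := h2
  have hdrop : List.drop (PySem.Chars.findFrom cs [ch] (pos : Int)).toNat cs = ch :: t := by
    simpa using ht.symm
  have ht' : cs.drop ((PySem.Chars.findFrom cs [ch] (pos : Int)).toNat + 1) = t := by
    have hcong := congrArg (List.drop 1) hdrop
    rw [List.drop_drop] at hcong
    simpa [Nat.add_comm] using hcong
  rw [hdrop, ht']

-- a character standing at index i makes [ch] a prefix of drop i
theorem pvPrefixAt (cs : List Char) (i : Nat) (hi : i < cs.length) (hch : cs[i] = ch) :
    [ch] <+: cs.drop i := by
  rw [List.drop_eq_getElem_cons hi, hch]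
  exact ⟨_, rfl⟩

theorem goB_eq_goA (cs : List Char) : ∀ (n pos : Nat) (depth : Int),
    cs.length - pos = n → pos ≤ cs.length → depth < 5 →
    findExplodeGoB cs pos depth = findExplodeGoA (cs.drop pos) depth (pos : Int) := by
  intro n
  induction n using Nat.strong_induction_on with
  | _ n ih =>
    intro pos depth hn hpos h5
    rw [findExplodeGoB]
    by_cases hoc : PySem.Chars.findFrom cs ['['] (pos : Int) < 0 ∧
        PySem.Chars.findFrom cs [']'] (pos : Int) < 0
    · rw [if_pos hoc]
      have hno : ∀ x ∈ cs.drop pos, x ≠ '[' ∧ x ≠ ']' := by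
        intro x hx
        constructor
        · intro heq
          have hinf : (['['] : List Char) <:+: cs.drop pos :=
            (singleton_infix_iff _ _).2 (heq ▸ hx)
          exact ((PySem.Chars.findFrom_natCast_eq_neg_one_iff cs ['['] pos hpos).1
            (pvFindFromNeg cs ['['] pos hoc.1)) hinf
        · intro heq
          have hinf : ([']'] : List Char) <:+: cs.drop pos :=
            (singleton_infix_iff _ _).2 (heq ▸ hx)
          exact ((PySem.Chars.findFrom_natCast_eq_neg_one_iff cs [']'] pos hpos).1
            (pvFindFromNeg cs [']'] pos hoc.2)) hinf
      rw [show cs.drop pos = cs.drop pos ++ [] by simp,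
        goA_skip (cs.drop pos) [] depth (pos : Int) (by omega) hno]
      rfl
    · rw [if_neg hoc]
      by_cases hbr : 0 ≤ PySem.Chars.findFrom cs ['['] (pos : Int) ∧
          (PySem.Chars.findFrom cs [']'] (pos : Int) < 0 ∨
            PySem.Chars.findFrom cs ['['] (pos : Int) < PySem.Chars.findFrom cs [']'] (pos : Int))
      · rw [if_pos hbr]
        obtain ⟨ho1, ho2, ho3, ho4, ho5⟩ := pvFindFromFound cs '[' pos hpos (by omega)
        -- the segment between pos and the next '[' is bracket-free
        have hseg : ∀ x ∈ (cs.drop pos).take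
            ((PySem.Chars.findFrom cs ['['] (pos : Int)).toNat - pos), x ≠ '[' ∧ x ≠ ']' := by
          intro x hx
          have hxmem := List.mem_of_mem_take hx
          rw [List.mem_iff_getElem] at hx
          obtain ⟨i, hi, hxi⟩ := hx
          have hil : i < (PySem.Chars.findFrom cs ['['] (pos : Int)).toNat - pos := by
            have := hi; simp at this; omega
          have hplen : pos + i < cs.length := by omega
          have hx' : x = cs[pos + i] := by
            rw [← hxi, List.getElem_take, List.getElem_drop]
          constructor
          · intro heq
            exact ho5 (pos + i) (by omega) (by omega)
              (pvPrefixAt cs (pos + i) hplen (by rw [← hx', heq]))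
          · intro heq
            rcases hbr.2 with hcneg | hlt
            · -- no ']' anywhere in the tail
              have hinf : ([']'] : List Char) <:+: cs.drop pos :=
                (singleton_infix_iff _ _).2 (heq ▸ hxmem)
              exact ((PySem.Chars.findFrom_natCast_eq_neg_one_iff cs [']'] pos hpos).1
                (pvFindFromNeg cs [']'] pos hcneg)) hinf
            · -- the next ']' is further right than the next '['
              obtain ⟨_, _, hc3, _, hc5⟩ := pvFindFromFound cs ']' pos hpos (by omega)
              refine hc5 (pos + i) (by omega) (by omega)
                (pvPrefixAt cs (pos + i) hplen (by rw [← hx', heq]))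
        have hsplit : cs.drop pos = (cs.drop pos).take
            ((PySem.Chars.findFrom cs ['['] (pos : Int)).toNat - pos) ++
            '[' :: cs.drop ((PySem.Chars.findFrom cs ['['] (pos : Int)).toNat + 1) := by
          conv_lhs => rw [← List.take_append_drop
            ((PySem.Chars.findFrom cs ['['] (pos : Int)).toNat - pos) (cs.drop pos)]
          rw [List.drop_drop, show pos + ((PySem.Chars.findFrom cs ['['] (pos : Int)).toNat - pos) =
            (PySem.Chars.findFrom cs ['['] (pos : Int)).toNat by omega, ho4]
        rw [hsplit, goA_skip _ _ depth (pos : Int) (by omega) hseg]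
        simp only [findExplodeGoA, if_true,
          if_neg (by decide : ¬ ('[' : Char) = ']')]
        have hlentake : ((cs.drop pos).take
            ((PySem.Chars.findFrom cs ['['] (pos : Int)).toNat - pos)).length =
            (PySem.Chars.findFrom cs ['['] (pos : Int)).toNat - pos := by
          simp; omega
        rw [hlentake]
        split_ifs with h515
        · omega
        · rw [ih (cs.length - ((PySem.Chars.findFrom cs ['['] (pos : Int)).toNat + 1)) (by omega)
            ((PySem.Chars.findFrom cs ['['] (pos : Int)).toNat + 1) (depth + 1) rfl (by omega)
            (by omega)]
          congr 1
          omega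
      · rw [if_neg hbr]
        have hcpos : ¬ PySem.Chars.findFrom cs [']'] (pos : Int) < 0 := by
          intro hcn
          exact hbr ⟨by omega, Or.inl hcn⟩
        obtain ⟨hc1, hc2, hc3, hc4, hc5⟩ := pvFindFromFound cs ']' pos hpos hcpos
        -- the segment between pos and the next ']' is bracket-free
        have hseg : ∀ x ∈ (cs.drop pos).take
            ((PySem.Chars.findFrom cs [']'] (pos : Int)).toNat - pos), x ≠ '[' ∧ x ≠ ']' := by
          intro x hx
          have hxmem := List.mem_of_mem_take hx
          rw [List.mem_iff_getElem] at hx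
          obtain ⟨i, hi, hxi⟩ := hx
          have hil : i < (PySem.Chars.findFrom cs [']'] (pos : Int)).toNat - pos := by
            have := hi; simp at this; omega
          have hplen : pos + i < cs.length := by omega
          have hx' : x = cs[pos + i] := by
            rw [← hxi, List.getElem_take, List.getElem_drop]
          constructor
          · intro heq
            by_cases ho : PySem.Chars.findFrom cs ['['] (pos : Int) < 0
            · have hinf : (['['] : List Char) <:+: cs.drop pos :=
                (singleton_infix_iff _ _).2 (heq ▸ hxmem)
              exact ((PySem.Chars.findFrom_natCast_eq_neg_one_iff cs ['['] pos hpos).1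
                (pvFindFromNeg cs ['['] pos ho)) hinf
            · obtain ⟨ho1, ho2, ho3, ho4, ho5⟩ := pvFindFromFound cs '[' pos hpos ho
              -- the next '[' is strictly beyond the next ']' (they cannot coincide)
              have hneq : (PySem.Chars.findFrom cs [']'] (pos : Int)).toNat ≠
                  (PySem.Chars.findFrom cs ['['] (pos : Int)).toNat := by
                intro he
                rw [he, ho4] at hc4
                exact absurd (List.cons_eq_cons.mp hc4).1 (by decide)
              have hco : (PySem.Chars.findFrom cs [']'] (pos : Int)).toNat <
                  (PySem.Chars.findFrom cs ['['] (pos : Int)).toNat := by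
                have : ¬ PySem.Chars.findFrom cs ['['] (pos : Int) <
                    PySem.Chars.findFrom cs [']'] (pos : Int) := fun hlt =>
                  hbr ⟨by omega, Or.inr hlt⟩
                omega
              exact ho5 (pos + i) (by omega) (by omega)
                (pvPrefixAt cs (pos + i) hplen (by rw [← hx', heq]))
          · intro heq
            exact hc5 (pos + i) (by omega) (by omega)
              (pvPrefixAt cs (pos + i) hplen (by rw [← hx', heq]))
        have hsplit : cs.drop pos = (cs.drop pos).take
            ((PySem.Chars.findFrom cs [']'] (pos : Int)).toNat - pos) ++
            ']' :: cs.drop ((PySem.Chars.findFrom cs [']'] (pos : Int)).toNat + 1) := by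
          conv_lhs => rw [← List.take_append_drop
            ((PySem.Chars.findFrom cs [']'] (pos : Int)).toNat - pos) (cs.drop pos)]
          rw [List.drop_drop, show pos + ((PySem.Chars.findFrom cs [']'] (pos : Int)).toNat - pos) =
            (PySem.Chars.findFrom cs [']'] (pos : Int)).toNat by omega, hc4]
        rw [hsplit, goA_skip _ _ depth (pos : Int) (by omega) hseg]
        simp only [findExplodeGoA, if_neg (by decide : ¬ (']' : Char) = '['), if_true]
        rw [if_neg (by omega : ¬ depth - 1 = 5)]
        have hlentake : ((cs.drop pos).take
            ((PySem.Chars.findFrom cs [']'] (pos : Int)).toNat - pos)).length =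
            (PySem.Chars.findFrom cs [']'] (pos : Int)).toNat - pos := by
          simp; omega
        rw [hlentake]
        rw [ih (cs.length - ((PySem.Chars.findFrom cs [']'] (pos : Int)).toNat + 1)) (by omega)
          ((PySem.Chars.findFrom cs [']'] (pos : Int)).toNat + 1) (depth - 1) rfl (by omega)
          (by omega)]
        congr 1
        omega

-- ===== VERDICT (by name: the statement is the Claim_ definition above) =====
theorem find_explode_spec : Claim_equal_find_explode := by
  intro number _
  unfold Spec_find_explode find_explode find_explode_alt
  rw [goB_eq_goA number.toList (number.toList.length) 0 0 rfl (by omega) (by norm_num)]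
  simp
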